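-- pv_equiv track=rewrite | github.com/pypi-data/pypi-mirror-399 | packages/opsparser/opsparser-0.1.3.tar.gz/opsparser-0.1.3/opsparser/_manager/_BlockManager.py | _calculate_3d_elements
-- ===== SOURCE A (Python) =====
-- from typing import Any, Optional, Dict, List
--
-- def _calculate_3d_elements(nx: int, ny: int, nz: int, start_ele: int) -> List[int]:
--     """Calculate generated element tags for 3D block
--
--     Args:
--         nx: Number of divisions in x direction
--         ny: Number of divisions in y direction
--         nz: Number of divisions in z direction
--         start_ele: Starting element tag
--
--     Returns:
--         List of generated element tags
--     """
--     elements = []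
--     for k in range(nz):
--         for j in range(ny):
--             for i in range(nx):
--                 ele_tag = start_ele + k * nx * ny + j * nx + i
--                 elements.append(ele_tag)
--     return elements
-- ===== SOURCE B (Python) =====
-- from typing import List
--
-- def _calculate_3d_elements(nx: int, ny: int, nz: int, start_ele: int) -> List[int]:
--     """Element tags of a 3D block are just consecutive integers: one per cell,
--     starting at start_ele, in a contiguous span of length nx*ny*nz."""
--     if nx <= 0 or ny <= 0 or nz <= 0:
--         return []
--     return list(range(start_ele, start_ele + nx * ny * nz))
-- ===== Notes on version B (the rewrite author's own statement) =====
-- stated objective: simpler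
-- what changed: Replaced the triple nested loop computing start_ele + k*nx*ny + j*nx + i with a single closed-form range over the contiguous tag span (empty when any dimension is non-positive).
import Mathlib
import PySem

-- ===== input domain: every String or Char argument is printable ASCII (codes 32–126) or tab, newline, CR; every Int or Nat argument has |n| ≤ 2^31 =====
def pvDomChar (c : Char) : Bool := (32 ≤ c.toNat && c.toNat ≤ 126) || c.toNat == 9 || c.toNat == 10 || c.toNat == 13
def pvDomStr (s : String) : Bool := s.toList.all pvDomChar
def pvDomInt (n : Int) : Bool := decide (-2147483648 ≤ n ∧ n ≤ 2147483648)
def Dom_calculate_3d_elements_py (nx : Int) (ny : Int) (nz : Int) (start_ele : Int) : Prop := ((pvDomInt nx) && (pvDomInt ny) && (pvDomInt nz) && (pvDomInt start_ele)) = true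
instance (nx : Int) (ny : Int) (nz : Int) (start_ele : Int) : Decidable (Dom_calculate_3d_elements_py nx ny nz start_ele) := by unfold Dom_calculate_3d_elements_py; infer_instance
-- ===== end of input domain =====

-- B replaces A's triple nested tag-arithmetic loop with one closed-form range over the contiguous tag span (simpler).

-- ===== PORT A =====
-- triple nested for-loops appending start_ele + k*nx*ny + j*nx + i
def calculate_3d_elements_py (nx : Int) (ny : Int) (nz : Int) (start_ele : Int) : List Int :=
  (PySem.List.pyRange 0 nz 1).foldl (fun elements k =>
    (PySem.List.pyRange 0 ny 1).foldl (fun elements j =>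
      (PySem.List.pyRange 0 nx 1).foldl (fun elements i =>
        elements ++ [start_ele + k * nx * ny + j * nx + i]) elements) elements) []

-- ===== PORT B =====
-- empty grid for a non-positive dimension; otherwise list(range(start_ele, start_ele + nx*ny*nz))
def calculate_3d_elements_py_alt (nx : Int) (ny : Int) (nz : Int) (start_ele : Int) : List Int :=
  if nx ≤ 0 ∨ ny ≤ 0 ∨ nz ≤ 0 then []
  else PySem.List.pyRange start_ele (start_ele + nx * ny * nz) 1

-- ===== PRECONDITION & SPEC =====
def Spec_calculate_3d_elements_py (nx : Int) (ny : Int) (nz : Int) (start_ele : Int) (out : List Int) : Prop := out = calculate_3d_elements_py_alt nx ny nz start_ele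
instance (nx : Int) (ny : Int) (nz : Int) (start_ele : Int) (out : List Int) : Decidable (Spec_calculate_3d_elements_py nx ny nz start_ele out) := by unfold Spec_calculate_3d_elements_py; infer_instance

-- ===== CLAIM (what is proved, stated in full; the proofs are below) =====
def Claim_equal_calculate_3d_elements_py : Prop := ∀ (nx : Int) (ny : Int) (nz : Int) (start_ele : Int), Dom_calculate_3d_elements_py nx ny nz start_ele → Spec_calculate_3d_elements_py nx ny nz start_ele (calculate_3d_elements_py nx ny nz start_ele)

-- ===== LEMMAS AND PROOFS =====

-- consecutive integers a, a+1, …, a+n-1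
def pvRg (a : Int) (n : Nat) : List Int := (List.range n).map (fun t : Nat => a + (t : Int))

theorem pvPyRange_one_eq_rg (a : Int) (n : Nat) :
    PySem.List.pyRange a (a + n) 1 = pvRg a n := by
  rw [PySem.List.pyRange_of_pos a (a + n) Int.one_pos]
  rcases Nat.eq_zero_or_pos n with h | h
  · simp [pvRg, h]
  · have hlt : a < a + (n : Int) := by omega
    simp only [if_pos hlt, pvRg]
    have : ((a + (n : Int) - a + 1 - 1) / 1).toNat = n := by omega
    rw [this]
    exact List.map_congr_left (fun t _ => by ring)

theorem pvRg_append (a : Int) (n m : Nat) : pvRg a (n + m) = pvRg a n ++ pvRg (a + n) m := by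
  simp only [pvRg, List.range_add, List.map_append, List.map_map]
  refine congrArg (_ ++ ·) (List.map_congr_left (fun t _ => ?_))
  simp only [Function.comp_apply]
  push_cast
  ring

theorem pvFlat_rg (n step : Nat) (a : Int) :
    (List.range n).flatMap (fun (k : Nat) => pvRg (a + (k : Int) * (step : Int)) step) = pvRg a (n * step) := by
  induction n with
  | zero => simp [pvRg]
  | succ n ih =>
      rw [List.range_succ, List.flatMap_append, ih, List.flatMap_singleton,
        Nat.succ_mul, pvRg_append]
      congr 1

-- ===== VERDICT (by name: the statement is the Claim_ definition above) =====
theorem calculate_3d_elements_py_spec : Claim_equal_calculate_3d_elements_py := by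
  intro nx ny nz start_ele _
  unfold Spec_calculate_3d_elements_py calculate_3d_elements_py calculate_3d_elements_py_alt
  simp only [PySem.List.foldl_append_singleton_eq_map, PySem.List.foldl_append_eq_flatMap,
    List.nil_append]
  by_cases hx : nx ≤ 0
  · have : PySem.List.pyRange 0 nx 1 = [] := by
      rw [PySem.List.pyRange_of_pos 0 nx Int.one_pos, if_neg (by omega)]; simp
    simp [this, hx]
  by_cases hy : ny ≤ 0
  · have : PySem.List.pyRange 0 ny 1 = [] := by
      rw [PySem.List.pyRange_of_pos 0 ny Int.one_pos, if_neg (by omega)]; simp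
    simp [this, hy]
  by_cases hz : nz ≤ 0
  · have : PySem.List.pyRange 0 nz 1 = [] := by
      rw [PySem.List.pyRange_of_pos 0 nz Int.one_pos, if_neg (by omega)]; simp
    simp [this, hz]
  · rw [if_neg (by tauto)]
    obtain ⟨Nx, hNx⟩ : ∃ m : Nat, nx = (m : Int) := ⟨nx.toNat, by omega⟩
    obtain ⟨Ny, hNy⟩ : ∃ m : Nat, ny = (m : Int) := ⟨ny.toNat, by omega⟩
    obtain ⟨Nz, hNz⟩ : ∃ m : Nat, nz = (m : Int) := ⟨nz.toNat, by omega⟩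
    subst hNx hNy hNz
    have hb : start_ele + (Nx : Int) * Ny * Nz = start_ele + ((Nz * (Ny * Nx) : Nat) : Int) := by
      push_cast; ring
    rw [hb, pvPyRange_one_eq_rg, PySem.List.pyRange_zero_natCast,
      PySem.List.pyRange_zero_natCast, PySem.List.pyRange_zero_natCast,
      List.flatMap_map]
    refine Eq.trans (List.flatMap_congr (fun k _ => ?_)) (pvFlat_rg Nz (Ny * Nx) start_ele)
    rw [List.flatMap_map]
    refine Eq.trans (List.flatMap_congr (fun j _ => ?_)) (pvFlat_rg Ny Nx _)
    simp only [pvRg, List.map_map]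
    refine List.map_congr_left (fun t _ => ?_)
    simp only [Function.comp_apply]
    push_cast
    ring
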